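-- pv_equiv track=rewrite | github.com/mpyrek/ASD | lab 4/sort_tab_strings_different_lengths.py | countin_sort_for_letter
-- ===== SOURCE A (Python) =====
-- def countin_sort_for_letter(A,start,k):
-- 	F=[0]*26
--
--
-- 	for el in A[start:]:
-- 		F[(ord(el[k-1])-97)]+=1
--
-- 	for i in range(1,len(F)):
-- 		F[i]=F[i]+F[i-1]
--
-- 	out=[0]*(len(A)-start)
--
-- 	for i in range(len(A)-1,start-1,-1):
-- 		idx=ord(A[i][k-1])-97
-- 		F[idx]=F[idx]-1
-- 		out[F[idx]]=A[i]
--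
-- 	A=A[:start]+out
-- 	return A
-- ===== SOURCE B (Python) =====
-- def countin_sort_for_letter(A, start, k):
--     # Bucket concatenation: for each of the 26 letter buckets in order, collect
--     # (in original order) the elements of A[start:] whose (k-1)th letter falls in it.
--     tail = A[start:]
--     out = A[:start]
--     for c in range(26):
--         out = out + [s for s in tail if ord(s[k - 1]) - 97 == c]
--     return out
-- ===== Notes on version B (the rewrite author's own statement) =====
-- stated objective: alternative
-- what changed: Replaces the histogram + prefix-sum + reverse-placement counting sort with direct bucket concatenation: one filter pass per letter bucket, appended in key order, with no mutable count/output arrays and no index arithmetic.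
-- outside the precondition, e.g. on countin_sort_for_letter(['G', 'a'], 0, 1): A returns ['G', 'a'], B returns ['a']; on countin_sort_for_letter(['ba', 'ab'], -1, 1): A returns ['ba', 'ba', 0, 'ab'], B returns ['ba', 'ab']
import Mathlib
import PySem

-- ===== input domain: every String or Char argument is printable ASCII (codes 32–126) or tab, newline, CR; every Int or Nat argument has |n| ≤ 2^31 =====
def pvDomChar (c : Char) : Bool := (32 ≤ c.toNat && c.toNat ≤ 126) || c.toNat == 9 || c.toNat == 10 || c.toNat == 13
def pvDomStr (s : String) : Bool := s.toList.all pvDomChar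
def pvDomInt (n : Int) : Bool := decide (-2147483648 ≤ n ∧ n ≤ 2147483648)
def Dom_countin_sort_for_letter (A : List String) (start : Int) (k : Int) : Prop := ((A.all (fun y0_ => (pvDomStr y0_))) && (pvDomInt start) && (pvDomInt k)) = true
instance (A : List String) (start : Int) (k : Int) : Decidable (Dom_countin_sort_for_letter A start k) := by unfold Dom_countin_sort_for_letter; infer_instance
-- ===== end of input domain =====

-- B replaces A's histogram + prefix-sum + reverse-placement counting sort by direct bucket
-- concatenation (one filter pass per letter, appended in key order): an alternative algorithm,
-- equal to A on the sort's evident domain (Pre_). A rebinds its local 'A'; neither version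
-- mutates the caller's list.

-- ===== PORT A =====
-- 'a'-defaults in pyGetD and "" in the output template are total stand-ins for positions where
-- Python would raise (resp. for the int 0 placeholders of out=[0]*…); Pre_ guarantees every
-- index is in range and every slot of out is overwritten.
def countin_sort_for_letter (A : List String) (start : Int) (k : Int) : List String :=
  let F : List Int := List.replicate 26 0
  let F := (PySem.List.slice A (some start) none).foldl (fun F el =>
      let idx : Int := ((PySem.List.pyGetD el.toList (k - 1) 'a').toNat : Int) - 97
      PySem.List.pySetD F idx (PySem.List.pyGetD F idx 0 + 1)) F
  let F := (PySem.List.pyRange 1 (F.length : Int) 1).foldl (fun F i =>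
      PySem.List.pySetD F i (PySem.List.pyGetD F i 0 + PySem.List.pyGetD F (i - 1) 0)) F
  let out : List String := List.replicate (((A.length : Int) - start).toNat) ""
  let res := (PySem.List.pyRange ((A.length : Int) - 1) (start - 1) (-1)).foldl
      (fun (st : List Int × List String) i =>
        let s := PySem.List.pyGetD A i ""
        let idx : Int := ((PySem.List.pyGetD s.toList (k - 1) 'a').toNat : Int) - 97
        let F := PySem.List.pySetD st.1 idx (PySem.List.pyGetD st.1 idx 0 - 1)
        (F, PySem.List.pySetD st.2 (PySem.List.pyGetD F idx 0) s)) (F, out)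
  PySem.List.slice A none (some start) ++ res.2

-- ===== PORT B =====
def countin_sort_for_letter_alt (A : List String) (start : Int) (k : Int) : List String :=
  let tail := PySem.List.slice A (some start) none
  (PySem.List.pyRange 0 26 1).foldl
    (fun out c => out ++ tail.filter
      (fun s => (((PySem.List.pyGetD s.toList (k - 1) 'a').toNat : Int) - 97) == c))
    (PySem.List.slice A none (some start))

-- ===== PRECONDITION & SPEC =====
-- Pre_ restricts to the counting sort's evident domain: 0 ≤ start and, for every string of
-- A[start:], index k-1 in range and a lowercase letter there. Outside it A raises IndexError,
-- returns a list still containing the int-0 placeholders (negative start), or returns an order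
-- produced by Python's accidental negative wraparound of the bucket index F[ord(c)-97] for
-- non-lowercase letters with code 71..96 — accidents of A's array arithmetic that a
-- bucket-based B has no reason to reproduce.
def Pre_countin_sort_for_letter (A : List String) (start : Int) (k : Int) : Prop :=
  0 ≤ start ∧
  ∀ s ∈ A.drop start.toNat,
    PySem.Raise.InRange s.toList.length (k - 1) ∧
    97 ≤ (PySem.List.pyGetD s.toList (k - 1) 'a').toNat ∧
    (PySem.List.pyGetD s.toList (k - 1) 'a').toNat ≤ 122
instance (A : List String) (start : Int) (k : Int) : Decidable (Pre_countin_sort_for_letter A start k) := by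
  unfold Pre_countin_sort_for_letter; infer_instance

def pvWitness_countin_sort_for_letter : List String × Int × Int := (["ba", "ab", "zz", "az"], 1, 2)

def Spec_countin_sort_for_letter (A : List String) (start : Int) (k : Int) (out : List String) : Prop := out = countin_sort_for_letter_alt A start k
instance (A : List String) (start : Int) (k : Int) (out : List String) : Decidable (Spec_countin_sort_for_letter A start k out) := by unfold Spec_countin_sort_for_letter; infer_instance

-- ===== CLAIM (what is proved, stated in full; the proofs are below) =====
def Claim_equal_countin_sort_for_letter : Prop := ∀ (A : List String) (start : Int) (k : Int), Dom_countin_sort_for_letter A start k → Pre_countin_sort_for_letter A start k → Spec_countin_sort_for_letter A start k (countin_sort_for_letter A start k)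

-- ===== LEMMAS AND PROOFS =====

def pvIc (k : Int) (s : String) : Nat := (PySem.List.pyGetD s.toList (k - 1) 'a').toNat - 97
def pvGK (k : Int) (L : List String) : Prop :=
  ∀ s ∈ L, 97 ≤ (PySem.List.pyGetD s.toList (k - 1) 'a').toNat ∧
           (PySem.List.pyGetD s.toList (k - 1) 'a').toNat ≤ 122
def pvBucket (k : Int) (L : List String) (c : Nat) : List String :=
  L.filter (fun s => pvIc k s = c)
def pvCnt (k : Int) (L : List String) (c : Nat) : Nat := (pvBucket k L c).length
def pvCumLt (k : Int) (L : List String) (c : Nat) : Nat :=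
  (L.filter (fun s => pvIc k s < c)).length

-- basics
lemma pvCumLt_zero (k L) : pvCumLt k L 0 = 0 := by simp [pvCumLt]

lemma pvCumLt_succ (k L c) : pvCumLt k L (c+1) = pvCumLt k L c + pvCnt k L c := by
  simp only [pvCumLt, pvCnt, pvBucket, ← List.countP_eq_length_filter]
  induction L with
  | nil => simp
  | cons s t ih =>
    simp only [List.countP_cons, ih]
    by_cases h1 : pvIc k s < c + 1 <;> by_cases h2 : pvIc k s < c <;>
      by_cases h3 : pvIc k s = c <;> simp only [h1, h2, h3, decide_true,
        decide_eq_false, if_true, if_false, decide_false] <;> first | omega | (simp; omega) | simp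

lemma pvCumLt_mono (k L) {c c' : Nat} (h : c ≤ c') : pvCumLt k L c ≤ pvCumLt k L c' := by
  induction L with
  | nil => simp [pvCumLt]
  | cons s t ih =>
    simp only [pvCumLt, List.filter_cons] at *
    by_cases h1 : pvIc k s < c
    · have : pvIc k s < c' := lt_of_lt_of_le h1 h
      simp [h1, this]; omega
    · by_cases h2 : pvIc k s < c'
      · simp [h1, h2]; omega
      · simp [h1, h2]; omega

lemma pvCumLt_le_length (k L c) : pvCumLt k L c ≤ L.length := List.length_filter_le _ _

lemma pvIc_lt_26 (k : Int) {L s} (hGK : pvGK k L) (hs : s ∈ L) : pvIc k s < 26 := by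
  have := hGK s hs; simp [pvIc]; omega

lemma pvCumLt_total (k L) (hGK : pvGK k L) : pvCumLt k L 26 = L.length := by
  unfold pvCumLt
  rw [List.filter_eq_self.mpr]
  intro s hs
  simpa using pvIc_lt_26 k hGK hs

-- append singletons
lemma pvBucket_append (k M e c) :
    pvBucket k (M ++ [e]) c = pvBucket k M c ++ if pvIc k e = c then [e] else [] := by
  simp [pvBucket, List.filter_append]; split_ifs with h <;> simp [h]

lemma pvCnt_append (k M e c) :
    pvCnt k (M ++ [e]) c = pvCnt k M c + if pvIc k e = c then 1 else 0 := by
  simp [pvCnt, pvBucket_append]; split_ifs <;> simp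

lemma pvCumLt_append (k M e c) :
    pvCumLt k (M ++ [e]) c = pvCumLt k M c + if pvIc k e < c then 1 else 0 := by
  simp [pvCumLt, List.filter_append]; split_ifs with h <;> simp [h]

-- get/set on range-maps
lemma pvGet (n : Nat) (g : Nat → Int) (i : Int) (h0 : 0 ≤ i) (h : i < (n:Int)) :
    PySem.List.pyGetD ((List.range n).map g) i 0 = g i.toNat := by
  rw [PySem.List.pyGetD_eq_getElem _ 0 h0 (by simpa using h)]
  simp

lemma pvSet (n : Nat) (g : Nat → Int) (i : Int) (v : Int) (h0 : 0 ≤ i) (h : i < (n:Int)) :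
    PySem.List.pySetD ((List.range n).map g) i v
      = (List.range n).map (fun c => if c = i.toNat then v else g c) := by
  rw [PySem.List.pySetD_of_nonneg _ v h0]
  apply List.ext_getElem (by simp)
  intro p hp hq
  simp only [List.getElem_set, List.getElem_map, List.getElem_range]
  split_ifs with h1 h2 h2 <;> (try rfl) <;> omega

lemma pvIdxEq (k : Int) (s : String)
    (h97 : 97 ≤ (PySem.List.pyGetD s.toList (k - 1) 'a').toNat) :
    ((PySem.List.pyGetD s.toList (k - 1) 'a').toNat : Int) - 97 = ((pvIc k s : Nat) : Int) := by
  simp [pvIc]; omega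

lemma pvHist (k : Int) (L : List String) (hGK : pvGK k L) :
    ∀ g : Nat → Int,
    L.foldl (fun F el =>
        let idx : Int := ((PySem.List.pyGetD el.toList (k - 1) 'a').toNat : Int) - 97
        PySem.List.pySetD F idx (PySem.List.pyGetD F idx 0 + 1)) ((List.range 26).map g)
      = (List.range 26).map (fun c => g c + (pvCnt k L c : Int)) := by
  induction L with
  | nil => intro g; simp [pvCnt, pvBucket]
  | cons s t ih =>
    intro g
    have hs := hGK s (by simp)
    have hlt : pvIc k s < 26 := by simp [pvIc]; omega
    have hGK' : pvGK k t := fun x hx => hGK x (List.mem_cons_of_mem _ hx)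
    simp only [List.foldl_cons]
    rw [pvIdxEq k s hs.1]
    rw [pvGet 26 g _ (by positivity) (by exact_mod_cast hlt)]
    rw [pvSet 26 g _ _ (by positivity) (by exact_mod_cast hlt)]
    simp only [Int.toNat_natCast]
    rw [ih hGK' _]
    apply List.map_congr_left
    intro c hc
    have : pvCnt k (s :: t) c = pvCnt k t c + if pvIc k s = c then 1 else 0 := by
      simp only [pvCnt, pvBucket, List.filter_cons]
      by_cases h : pvIc k s = c <;> simp [h]
    rw [this]
    by_cases h : c = pvIc k s
    · subst h
      simp only [if_pos rfl]
      push_cast; ring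
    · have h' : ¬ pvIc k s = c := fun e => h e.symm
      simp only [if_neg h, if_neg h']
      push_cast; ring

lemma pvPrefAux (k : Int) (L : List String) :
    ∀ m : Nat, m ≤ 26 →
    (PySem.List.pyRange 1 (m : Int) 1).foldl (fun F i =>
        PySem.List.pySetD F i (PySem.List.pyGetD F i 0 + PySem.List.pyGetD F (i - 1) 0))
      ((List.range 26).map (fun c => (pvCnt k L c : Int)))
    = (List.range 26).map (fun c =>
        if c < m then (pvCumLt k L (c+1) : Int) else (pvCnt k L c : Int)) := by
  intro m
  induction m with
  | zero => intro _; simp [PySem.List.pyRange_one_eq_nil]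
  | succ m ih =>
    intro hm
    rcases Nat.eq_zero_or_pos m with h0 | h1
    · subst h0
      rw [show ((1:Nat):Int) = 1 by norm_num] at *
      rw [PySem.List.pyRange_one_eq_nil (by norm_num)]
      simp only [List.foldl_nil]
      apply List.map_congr_left
      intro c hc
      by_cases h : c < 1
      · have : c = 0 := by omega
        subst this
        have := pvCumLt_succ k L 0
        rw [pvCumLt_zero] at this
        simp [this]
      · simp [h]
    · have hcast : ((m:Int) + 1) = ((m+1 : Nat) : Int) := by push_cast; ring
      rw [← hcast, PySem.List.pyRange_one_succ_right (by exact_mod_cast h1), List.foldl_append]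
      rw [ih (by omega)]
      simp only [List.foldl_cons, List.foldl_nil]
      have hm26 : (m:Int) < (26:Nat) := by exact_mod_cast (by omega : m < 26)
      rw [pvGet 26 _ (m:Int) (by positivity) (by exact_mod_cast hm26)]
      have hm1 : ((m:Int) - 1) = ((m - 1 : Nat) : Int) := by omega
      rw [hm1, pvGet 26 _ ((m-1:Nat):Int) (by positivity) (by exact_mod_cast (by omega : m - 1 < 26))]
      rw [pvSet 26 _ (m:Int) _ (by positivity) (by exact_mod_cast hm26)]
      simp only [Int.toNat_natCast]
      apply List.map_congr_left
      intro c hc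
      simp only [List.mem_range] at hc
      have e1 : ¬ (m < m) := by omega
      have e2 : m - 1 < m := by omega
      have e3 : m - 1 + 1 = m := by omega
      by_cases h : c = m
      · rw [h]
        simp only [if_pos rfl, if_neg e1, if_pos e2, e3, if_pos (by omega : m < m + 1)]
        have := pvCumLt_succ k L m
        simp
        omega
      · by_cases h2 : c < m
        · have h3 : c < m + 1 := by omega
          simp only [if_neg h, if_pos h2, if_pos h3]
        · have h3 : ¬ c < m + 1 := by omega
          simp only [if_neg h, if_neg h2, if_neg h3]

def pvStep (k : Int) (st : List Int × List String) (s : String) : List Int × List String :=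
  let idx : Int := ((PySem.List.pyGetD s.toList (k - 1) 'a').toNat : Int) - 97
  let F := PySem.List.pySetD st.1 idx (PySem.List.pyGetD st.1 idx 0 - 1)
  (F, PySem.List.pySetD st.2 (PySem.List.pyGetD F idx 0) s)

lemma pvPlace (k : Int) :
    ∀ (R : List String) (shift : Nat → Nat) (out : List String),
      pvGK k R →
      (∀ c c' : Nat, c ≤ c' → shift c ≤ shift c') →
      (∀ c : Nat, c < 26 → pvCumLt k R.reverse (c+1) + shift c ≤ out.length) →
      ((R.foldl (pvStep k) ((List.range 26).map
          (fun c => ((pvCumLt k R.reverse (c+1) + shift c : Nat) : Int)), out)).2.length = out.length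
       ∧ (∀ c : Nat, c < 26 → ∀ r : Nat, r < pvCnt k R.reverse c →
          ((R.foldl (pvStep k) ((List.range 26).map
            (fun c => ((pvCumLt k R.reverse (c+1) + shift c : Nat) : Int)), out)).2)[pvCumLt k R.reverse c + shift c + r]?
            = (pvBucket k R.reverse c)[r]?)
       ∧ (∀ p : Nat, p < out.length →
          (∀ c : Nat, c < 26 → p < pvCumLt k R.reverse c + shift c ∨ pvCumLt k R.reverse (c+1) + shift c ≤ p) →
          ((R.foldl (pvStep k) ((List.range 26).map
            (fun c => ((pvCumLt k R.reverse (c+1) + shift c : Nat) : Int)), out)).2)[p]? = out[p]?)) := by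
  intro R
  induction R with
  | nil =>
    intro shift out _ _ _
    refine ⟨rfl, ?_, fun p _ _ => rfl⟩
    intro c _ r hr
    simp [pvCnt, pvBucket] at hr
  | cons e R' ih =>
    intro shift out hGK hmono hbound
    have hGK' : pvGK k R' := fun x hx => hGK x (List.mem_cons_of_mem _ hx)
    have hse := hGK e (List.mem_cons_self)
    have hce26 : pvIc k e < 26 := by simp [pvIc]; omega
    -- abbreviations
    set M' := R'.reverse with hM'
    set ce := pvIc k e with hce
    set q := pvCumLt k M' (ce+1) + shift ce with hq
    set shift' : Nat → Nat := fun c => shift c + if ce < c then 1 else 0 with hshift'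
    have hrev : (e :: R').reverse = M' ++ [e] := by simp [hM']
    have hcum : ∀ c : Nat, pvCumLt k ((e :: R').reverse) c = pvCumLt k M' c + if ce < c then 1 else 0 := by
      intro c; rw [hrev, pvCumLt_append]
    have hcnt : ∀ c : Nat, pvCnt k ((e :: R').reverse) c = pvCnt k M' c + if ce = c then 1 else 0 := by
      intro c; rw [hrev, pvCnt_append]
    have hbkt : ∀ c : Nat, pvBucket k ((e :: R').reverse) c
        = pvBucket k M' c ++ if ce = c then [e] else [] := by
      intro c; rw [hrev, pvBucket_append]
    have hqlen : q < out.length := by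
      have := hbound ce hce26
      have := hcum (ce+1)
      simp only [if_pos (by omega : ce < ce + 1)] at this
      omega
    -- the first step of the fold
    have hstep : pvStep k ((List.range 26).map
        (fun c => ((pvCumLt k ((e :: R').reverse) (c+1) + shift c : Nat) : Int)), out) e
        = ((List.range 26).map
            (fun c => ((pvCumLt k M' (c+1) + shift' c : Nat) : Int)), out.set q e) := by
      simp only [pvStep]
      rw [pvIdxEq k e hse.1]
      rw [pvGet 26 _ (ce:Int) (by positivity) (by exact_mod_cast hce26)]
      rw [pvSet 26 _ (ce:Int) _ (by positivity) (by exact_mod_cast hce26)]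
      simp only [Int.toNat_natCast]
      have hval : ((pvCumLt k ((e :: R').reverse) (ce+1) + shift ce : Nat) : Int) - 1 = ((q:Nat):Int) := by
        have := hcum (ce+1)
        simp only [if_pos (by omega : ce < ce + 1)] at this
        rw [this, hq]; push_cast; ring
      simp only [Prod.mk.injEq]
      constructor
      · apply List.map_congr_left
        intro c hc
        by_cases h : c = ce
        · rw [h, if_pos rfl, hval]
          simp only [hshift', hq]
          simp
        · rw [if_neg h]
          have := hcum (c+1)
          have hif : (ce < c + 1) = (ce < c ∨ ce = c) := by
            apply propext; constructor <;> intro <;> omega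
          rw [this, hshift']
          simp only
          by_cases h2 : ce < c
          · simp only [if_pos (show ce < c + 1 by omega), if_pos h2]
            push_cast; ring
          · have h3 : ¬ ce < c + 1 := by omega
            simp [if_neg h3, if_neg h2]
            omega
      · rw [pvGet 26 _ (ce:Int) (by positivity) (by exact_mod_cast hce26)]
        simp only [Int.toNat_natCast, if_true]
        rw [hval, PySem.List.pySetD_of_nonneg _ _ (by positivity)]
        simp
    rw [List.foldl_cons, hstep]
    obtain ⟨ihlen, ih2, ih3⟩ := ih shift' (out.set q e) hGK'
      (by intro c c' hcc; simp only [hshift']; have := hmono c c' hcc; split_ifs <;> omega)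
      (by intro c hc
          have hb := hbound c hc
          have := hcum (c+1)
          simp only [List.length_set]
          simp only [hshift']
          by_cases h2 : ce < c
          · simp only [if_pos (by omega : ce < c + 1)] at this
            simp only [if_pos h2]
            omega
          · by_cases h3 : ce = c
            · simp only [if_pos (by omega : ce < c + 1)] at this
              simp only [if_neg h2]
              omega
            · simp only [if_neg (by omega : ¬ ce < c + 1)] at this
              simp only [if_neg h2]
              omega)
    refine ⟨by simpa using ihlen, ?_, ?_⟩
    · -- conclusion (2)
      intro c hc r hr
      rw [hcnt c] at hr
      rw [hbkt c]
      by_cases h : ce = c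
      · subst h
        simp only [if_pos rfl, eq_self_iff_true, if_true] at hr ⊢
        have hceq : pvCumLt k ((e :: R').reverse) ce = pvCumLt k M' ce := by
          rw [hcum ce, if_neg (show ¬ ce < ce by omega), Nat.add_zero]
        rcases Nat.lt_or_ge r (pvCnt k M' ce) with hr2 | hr2
        · have := ih2 ce hc r hr2
          rw [hceq]
          have hsh : shift' ce = shift ce := by simp [hshift']
          rw [← hsh]
          rw [this]
          rw [List.getElem?_append_left hr2]
        · have hreq : r = pvCnt k M' ce := by omega
          subst hreq
          have hpq : pvCumLt k ((e :: R').reverse) ce + shift ce + pvCnt k M' ce = q := by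
            rw [hceq, hq]
            have := pvCumLt_succ k M' ce
            omega
          rw [hpq]
          have huntouched : ∀ c' : Nat, c' < 26 →
              q < pvCumLt k M' c' + shift' c' ∨ pvCumLt k M' (c'+1) + shift' c' ≤ q := by
            intro c' hc'
            simp only [hshift']
            by_cases h2 : ce < c'
            · left
              have h3 := pvCumLt_mono k M' (by omega : ce + 1 ≤ c')
              have h4 := hmono ce c' (by omega)
              simp only [if_pos h2]
              omega
            · right
              have h3 := pvCumLt_mono k M' (by omega : c' + 1 ≤ ce + 1)
              have h4 := hmono c' ce (by omega)
              simp only [if_neg h2]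
              omega
          have := ih3 q (by simpa using hqlen) huntouched
          rw [this]
          rw [List.getElem?_set_eq_of_lt _ hqlen]
          have : (pvBucket k M' ce).length = pvCnt k M' ce := rfl
          rw [List.getElem?_append_right (by omega), this]
          simp
      · simp only [if_neg h, List.append_nil] at hr ⊢
        have hceq : pvCumLt k ((e :: R').reverse) c + shift c = pvCumLt k M' c + shift' c := by
          rw [hcum c, hshift']
          simp only
          by_cases h2 : ce < c <;> simp [h2] <;> omega
        rw [hceq]
        exact ih2 c hc r hr
    · -- conclusion (3)
      intro p hp hunt
      have huntouched' : ∀ c : Nat, c < 26 →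
          p < pvCumLt k M' c + shift' c ∨ pvCumLt k M' (c+1) + shift' c ≤ p := by
        intro c hc
        have h1 := hunt c hc
        rw [hcum c, hcum (c+1)] at h1
        simp only [hshift']
        by_cases h2 : ce < c
        · simp only [if_pos h2, if_pos (by omega : ce < c + 1)] at h1
          simp only [if_pos h2]
          omega
        · simp only [if_neg h2] at h1 ⊢
          by_cases h3 : ce < c + 1
          · simp only [if_pos h3] at h1
            omega
          · simp only [if_neg h3] at h1
            omega
      have := ih3 p (by simpa using hp) huntouched'
      rw [this]
      have hpq : q ≠ p := by
        have h1 := hunt ce hce26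
        rw [hcum ce, hcum (ce+1)] at h1
        simp only [if_neg (by omega : ¬ ce < ce), if_pos (by omega : ce < ce + 1)] at h1
        have hmono2 := pvCumLt_mono k M' (show ce ≤ ce + 1 by omega)
        simp only [hq]
        omega
      rw [List.getElem?_set_of_lt' _ _ hqlen, if_neg hpq]

lemma pvFlatLen (k : Int) (L : List String) :
    ∀ m : Nat, ((List.range m).flatMap (pvBucket k L)).length = pvCumLt k L m := by
  intro m
  induction m with
  | zero => simp [pvCumLt_zero]
  | succ m ih =>
    rw [List.range_succ, List.flatMap_append, List.length_append, ih, pvCumLt_succ]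
    simp [pvCnt]

lemma pvFlatGet (k : Int) (L : List String) (c : Nat) (hc : c < 26) (r : Nat)
    (hr : r < pvCnt k L c) :
    ((List.range 26).flatMap (pvBucket k L))[pvCumLt k L c + r]? = (pvBucket k L c)[r]? := by
  have hsplit : (26:Nat) = (c+1) + (25 - c) := by omega
  rw [hsplit, List.range_add, List.flatMap_append]
  have hlen1 : ((List.range (c+1)).flatMap (pvBucket k L)).length = pvCumLt k L (c+1) :=
    pvFlatLen k L (c+1)
  rw [List.getElem?_append_left (by rw [hlen1, pvCumLt_succ]; omega)]
  rw [List.range_succ, List.flatMap_append]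
  rw [List.getElem?_append_right (by rw [pvFlatLen k L c]; omega)]
  rw [pvFlatLen k L c]
  simp [Nat.add_sub_cancel_left]

lemma pvStair (k : Int) (L : List String) (p : Nat) :
    ∀ b : Nat, p < pvCumLt k L b → ∃ c, c < b ∧ pvCumLt k L c ≤ p ∧ p < pvCumLt k L (c+1) := by
  intro b
  induction b with
  | zero => intro h; rw [pvCumLt_zero] at h; omega
  | succ b ih =>
    intro h
    by_cases h2 : p < pvCumLt k L b
    · obtain ⟨c, hc1, hc2, hc3⟩ := ih h2
      exact ⟨c, by omega, hc2, hc3⟩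
    · exact ⟨b, by omega, by omega, h⟩

lemma pvScatterEqFlat (k : Int) (L : List String) (hGK : pvGK k L) :
    (L.reverse.foldl (pvStep k)
      ((List.range 26).map (fun c => ((pvCumLt k L (c+1) + 0 : Nat) : Int)),
        List.replicate L.length "")).2
    = (List.range 26).flatMap (pvBucket k L) := by
  have hGKr : pvGK k L.reverse := fun s hs => hGK s (List.mem_reverse.mp hs)
  have h := pvPlace k L.reverse (fun _ => 0) (List.replicate L.length "") hGKr
    (fun c c' _ => le_refl 0)
    (by intro c _; rw [List.reverse_reverse, List.length_replicate]
        have := pvCumLt_le_length k L (c+1); omega)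
  rw [List.reverse_reverse] at h
  obtain ⟨hlen, h2, _⟩ := h
  apply List.ext_getElem?
  intro p
  by_cases hp : p < L.length
  · obtain ⟨c, hc, hle, hlt⟩ := pvStair k L p 26 (by rw [pvCumLt_total k L hGK]; exact hp)
    have hr : p - pvCumLt k L c < pvCnt k L c := by
      have := pvCumLt_succ k L c; omega
    have e2 := h2 c hc (p - pvCumLt k L c) hr
    have hpe : pvCumLt k L c + 0 + (p - pvCumLt k L c) = p := by omega
    rw [hpe] at e2
    rw [e2, ← pvFlatGet k L c hc _ hr, show pvCumLt k L c + (p - pvCumLt k L c) = p by omega]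
  · have hl1 : p ≥ (L.reverse.foldl (pvStep k)
      ((List.range 26).map (fun c => ((pvCumLt k L (c+1) + 0 : Nat) : Int)),
        List.replicate L.length "")).2.length := by
      rw [hlen, List.length_replicate]; omega
    have hl2 : p ≥ ((List.range 26).flatMap (pvBucket k L)).length := by
      rw [pvFlatLen k L 26, pvCumLt_total k L hGK]; omega
    rw [List.getElem?_eq_none (by omega), List.getElem?_eq_none (by omega)]

lemma pvBucketChar (k : Int) (L : List String) (hGK : pvGK k L) (c : Nat) :
    L.filter (fun s => (((PySem.List.pyGetD s.toList (k - 1) 'a').toNat : Int) - 97) == ((c:Nat):Int))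
      = pvBucket k L c := by
  apply List.filter_congr
  intro s hs
  have := hGK s hs
  have h : ((((PySem.List.pyGetD s.toList (k - 1) 'a').toNat : Int) - 97) = ((c:Nat):Int))
      ↔ (pvIc k s = c) := by
    simp [pvIc]; omega
  rw [Bool.eq_iff_iff, beq_iff_eq, decide_eq_true_iff]
  exact h

lemma pvFlatMapCongr {α β : Type} (l : List α) (f g : α → List β)
    (h : ∀ x ∈ l, f x = g x) : l.flatMap f = l.flatMap g := by
  induction l with
  | nil => rfl
  | cons x t ih =>
    simp only [List.flatMap_cons]
    rw [h x (by simp), ih (fun y hy => h y (List.mem_cons_of_mem _ hy))]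

theorem pvMain (A : List String) (start k : Int)
    (h0 : 0 ≤ start)
    (hP : ∀ s ∈ A.drop start.toNat,
      PySem.Raise.InRange s.toList.length (k - 1) ∧
      97 ≤ (PySem.List.pyGetD s.toList (k - 1) 'a').toNat ∧
      (PySem.List.pyGetD s.toList (k - 1) 'a').toNat ≤ 122) :
    countin_sort_for_letter A start k = countin_sort_for_letter_alt A start k := by
  have hGK : pvGK k (A.drop start.toNat) := fun s hs => ⟨(hP s hs).2.1, (hP s hs).2.2⟩
  simp only [countin_sort_for_letter, countin_sort_for_letter_alt]
  rw [PySem.List.slice_from A h0]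
  rw [show (List.replicate 26 (0:Int)) = (List.range 26).map (fun _ => (0:Int)) from rfl]
  rw [pvHist k _ hGK ((fun _ => (0:Int)))]
  rw [show ((List.range 26).map (fun c => (0:Int) + (pvCnt k (A.drop start.toNat) c : Int)))
      = (List.range 26).map (fun c => (pvCnt k (A.drop start.toNat) c : Int))
      from List.map_congr_left (fun c _ => by ring)]
  rw [show (((List.range 26).map (fun c => (pvCnt k (A.drop start.toNat) c : Int))).length : Int)
      = ((26:Nat):Int) by simp]
  rw [pvPrefAux k (A.drop start.toNat) 26 (le_refl 26)]
  rw [show ((List.range 26).map (fun c =>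
        if c < 26 then (pvCumLt k (A.drop start.toNat) (c+1) : Int)
        else (pvCnt k (A.drop start.toNat) c : Int)))
      = (List.range 26).map (fun c => ((pvCumLt k (A.drop start.toNat) (c+1) + 0 : Nat) : Int))
      from List.map_congr_left (fun c hc => by
        simp only [List.mem_range] at hc
        rw [if_pos hc]; norm_num)]
  rw [show (((A.length : Int) - start).toNat) = (A.drop start.toNat).length by
        rw [List.length_drop]; omega]
  rw [PySem.List.pyRange_neg_one_eq_reverse]
  rw [show start - 1 + 1 = start by ring, show (A.length:Int) - 1 + 1 = (A.length:Int) by ring]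
  rw [show (fun (st : List Int × List String) (i : Int) =>
        let s := PySem.List.pyGetD A i ""
        let idx : Int := ((PySem.List.pyGetD s.toList (k - 1) 'a').toNat : Int) - 97
        let F := PySem.List.pySetD st.1 idx (PySem.List.pyGetD st.1 idx 0 - 1)
        (F, PySem.List.pySetD st.2 (PySem.List.pyGetD F idx 0) s))
      = (fun (st : List Int × List String) (i : Int) => pvStep k st (PySem.List.pyGetD A i ""))
      from rfl]
  rw [show (PySem.List.pyRange start (A.length:Int)).reverse.foldl
        (fun (st : List Int × List String) (i : Int) => pvStep k st (PySem.List.pyGetD A i ""))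
        ((List.range 26).map (fun c => ((pvCumLt k (A.drop start.toNat) (c+1) + 0 : Nat) : Int)),
          List.replicate (A.drop start.toNat).length "")
      = (A.drop start.toNat).reverse.foldl (pvStep k)
        ((List.range 26).map (fun c => ((pvCumLt k (A.drop start.toNat) (c+1) + 0 : Nat) : Int)),
          List.replicate (A.drop start.toNat).length "") by
    rw [show (A.drop start.toNat).reverse
        = ((PySem.List.pyRange start (A.length:Int)).map (fun j => PySem.List.pyGetD A j "")).reverse
        from by rw [PySem.List.map_pyGetD_pyRange' A "" h0]]
    rw [← List.map_reverse, List.foldl_map]]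
  rw [pvScatterEqFlat k (A.drop start.toNat) hGK]
  rw [PySem.List.foldl_append_eq_flatMap]
  rw [show (26:Int) = ((26:Nat):Int) by norm_num]
  rw [PySem.List.pyRange_zero_nat 26]
  rw [List.flatMap_map]
  congr 1
  apply pvFlatMapCongr
  intro c hc
  exact (pvBucketChar k _ hGK c).symm

-- ===== VERDICT (by name: the statement is the Claim_ definition above) =====
theorem countin_sort_for_letter_spec : Claim_equal_countin_sort_for_letter := by
  intro A start k _ hpre
  unfold Pre_countin_sort_for_letter at hpre
  unfold Spec_countin_sort_for_letter
  exact pvMain A start k hpre.1 hpre.2
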